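-- pv_equiv track=rewrite | github.com/KonkenBonken/kattis | fibonacci.py | F
-- ===== SOURCE A (Python) =====
-- def F(n):
--     if n <= 1:
--         return n
--     a, b = 1, 2
--     for _ in range(n-2):
--         c = b << a.bit_length() | a
--         a, b = b, c
--     return b
-- ===== SOURCE B (Python) =====
-- def F(n):
--     if n <= 1:
--         return n
--     s = "1"
--     for _ in range(n - 1):
--         s = "".join("10" if c == "1" else "1" for c in s)
--     return int(s, 2)
-- ===== Notes on version B (the rewrite author's own statement) =====
-- stated objective: alternative
-- what changed: B drops A's two-operand shift/or recurrence entirely and instead generates the result's binary expansion as iterates of the Fibonacci substitution morphism (1->10, 0->1) on a single string, converting once at the end; correct because phi(S(k)) = S(k+1) for the concatenation sequence S.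
import Mathlib
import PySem

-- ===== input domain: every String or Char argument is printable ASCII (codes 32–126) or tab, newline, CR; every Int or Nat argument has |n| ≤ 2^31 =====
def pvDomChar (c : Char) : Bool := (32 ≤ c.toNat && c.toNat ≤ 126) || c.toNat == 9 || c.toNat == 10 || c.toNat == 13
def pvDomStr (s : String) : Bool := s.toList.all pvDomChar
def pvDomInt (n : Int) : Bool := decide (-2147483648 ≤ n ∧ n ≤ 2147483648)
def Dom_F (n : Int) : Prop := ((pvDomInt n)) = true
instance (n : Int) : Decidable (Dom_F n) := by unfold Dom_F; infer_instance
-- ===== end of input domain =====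

-- B generates the result's binary digits by iterating the Fibonacci substitution
-- morphism 1->10, 0->1 on a single string instead of A's two-operand shift/or
-- recurrence (objective: alternative; same asymptotic cost).

-- ===== PORT A =====
-- 'for _ in range(n-2)' as the obvious structural recursion on the trip count
def loopA : Nat → Int × Int → Int × Int
  | 0, ab => ab
  | k + 1, (a, b) => loopA k (b, PySem.Int.bor (b <<< PySem.Int.bitLength a) a)

def F (n : Int) : Int :=
  if n ≤ 1 then n else (loopA (n - 2).toNat (1, 2)).2

-- ===== PORT B =====
-- Python str ported as its list of characters; int(s, 2) ported by hand (exact for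
-- strings of '0'/'1' digits, the only strings B ever builds)
def val2 (l : List Char) : Int :=
  l.foldl (fun acc c => 2 * acc + (if c = '1' then 1 else 0)) 0

-- ''.join('10' if c == '1' else '1' for c in s)
def phi (l : List Char) : List Char :=
  l.flatMap (fun c => if c = '1' then ['1', '0'] else ['1'])

-- 'for _ in range(n-1): s = phi(s)'
def loopB : Nat → List Char → List Char
  | 0, s => s
  | k + 1, s => loopB k (phi s)

def F_alt (n : Int) : Int :=
  if n ≤ 1 then n else val2 (loopB (n - 1).toNat ['1'])

-- ===== PRECONDITION & SPEC =====
def Spec_F (n : Int) (out : Int) : Prop := out = F_alt n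
instance (n : Int) (out : Int) : Decidable (Spec_F n out) := by unfold Spec_F; infer_instance

-- ===== CLAIM (what is proved, stated in full; the proofs are below) =====
def Claim_equal_F : Prop := ∀ (n : Int), Dom_F n → Spec_F n (F n)

-- ===== LEMMAS AND PROOFS =====

-- canonical binary string: nonempty, leading '1', only binary digits
def Bin (l : List Char) : Prop :=
  l.head? = some '1' ∧ ∀ c ∈ l, c = '0' ∨ c = '1'

-- the iterates of the morphism, for reasoning
def iterPhi : Nat → List Char
  | 0 => ['1']
  | k + 1 => phi (iterPhi k)

theorem loopB_eq_iterPhi_aux (k : Nat) (s : List Char) :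
    loopB k (phi s) = phi (loopB k s) := by
  induction k generalizing s with
  | zero => simp [loopB]
  | succ k ih => simp only [loopB]; exact ih (phi s)

theorem loopB_eq_iterPhi (k : Nat) : loopB k ['1'] = iterPhi k := by
  induction k with
  | zero => rfl
  | succ k ih => simp only [loopB, iterPhi, ← ih]; exact loopB_eq_iterPhi_aux k _

theorem phi_append (x y : List Char) : phi (x ++ y) = phi x ++ phi y := by
  simp [phi]

-- the morphism generates the concatenation recurrence S(k+2) = S(k+1) ++ S(k)
theorem iterPhi_succ_succ (k : Nat) :
    iterPhi (k + 2) = iterPhi (k + 1) ++ iterPhi k := by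
  induction k with
  | zero => rfl
  | succ k ih =>
    have h1 : iterPhi (k + 3) = phi (iterPhi (k + 2)) := rfl
    rw [h1, ih, phi_append,
      show phi (iterPhi (k + 1)) = iterPhi (k + 2) from rfl,
      show phi (iterPhi k) = iterPhi (k + 1) from rfl, ih]

theorem bin_iterPhi (k : Nat) : Bin (iterPhi k) := by
  induction k with
  | zero =>
    refine ⟨rfl, ?_⟩
    intro c hc
    simp only [iterPhi, List.mem_singleton] at hc
    right; exact hc
  | succ k ih =>
    obtain ⟨h1, h2⟩ := ih
    constructor
    · rcases hl : iterPhi k with _ | ⟨c, t⟩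
      · rw [hl] at h1; simp at h1
      · rw [hl] at h1
        have hc : c = '1' := by simpa using h1
        subst hc
        simp [iterPhi, hl, phi]
    · intro c hc
      simp only [iterPhi, phi, List.mem_flatMap] at hc
      obtain ⟨d, _, hd2⟩ := hc
      by_cases hd : d = '1'
      · simp [hd] at hd2
        rcases hd2 with h | h <;> simp [h]
      · simp [hd] at hd2
        simp [hd2]

theorem lor_shift (k a b : Nat) (h : a < 2 ^ k) : ((b <<< k) ||| a) = b * 2 ^ k + a := by
  induction k generalizing a b with
  | zero => interval_cases a; simp
  | succ k ih =>
    have hd : a / 2 < 2 ^ k := by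
      have : 2 ^ (k + 1) = 2 * 2 ^ k := by ring
      omega
    have h1 : b <<< (k + 1) = Nat.bit false (b <<< k) := by
      simp [Nat.bit_val, Nat.shiftLeft_succ, Nat.mul_comm]
    have h2 : a = Nat.bit (a.testBit 0) (a >>> 1) := (Nat.bit_testBit_zero_shiftRight_one a).symm
    rw [h1, h2, Nat.lor_bit, ih _ _ (by simpa [Nat.shiftRight_one] using hd)]
    simp [Nat.bit_val, Nat.shiftRight_one, Nat.testBit_zero]
    rw [pow_succ]; ring

theorem val2_foldl (l : List Char) (acc : Int) :
    l.foldl (fun acc c => 2 * acc + (if c = '1' then 1 else 0)) acc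
      = acc * 2 ^ l.length + val2 l := by
  induction l generalizing acc with
  | nil => simp [val2]
  | cons c t ih =>
    simp only [List.foldl_cons, List.length_cons, val2]
    rw [ih, ih (2 * 0 + _)]
    ring

theorem val2_append (x y : List Char) :
    val2 (x ++ y) = val2 x * 2 ^ y.length + val2 y := by
  simp only [val2, List.foldl_append]
  exact val2_foldl y _

theorem val2_lt (l : List Char) (h : ∀ c ∈ l, c = '0' ∨ c = '1') :
    0 ≤ val2 l ∧ val2 l < 2 ^ l.length := by
  induction l with
  | nil => simp [val2]
  | cons c t ih =>
    have ht := ih (fun c hc => h c (List.mem_cons_of_mem _ hc))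
    have hc := h c List.mem_cons_self
    have : val2 (c :: t) = (2 * 0 + (if c = '1' then 1 else 0)) * 2 ^ t.length + val2 t := by
      simp only [val2, List.foldl_cons]; exact val2_foldl t _
    rw [this]
    have hp : (0 : Int) < 2 ^ t.length := by positivity
    rcases hc with hc | hc <;> subst hc <;> simp [List.length_cons, pow_succ] <;> constructor <;>
      nlinarith [ht.1, ht.2]

theorem val2_ge (l : List Char) (h : Bin l) :
    2 ^ (l.length - 1) ≤ val2 l := by
  rcases l with _ | ⟨c, t⟩
  · simp [Bin] at h
  · obtain ⟨h1, h2⟩ := h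
    have hc : c = '1' := by simpa using h1
    subst hc
    have ht := val2_lt t (fun c hc => h2 c (List.mem_cons_of_mem _ hc))
    have h0 : val2 ('1' :: t)
        = List.foldl (fun acc c => 2 * acc + (if c = '1' then 1 else 0)) 1 t := by
      simp [val2]
    rw [h0, val2_foldl t 1]
    simp only [List.length_cons, Nat.add_sub_cancel, one_mul]
    linarith [ht.1]

theorem val2_nonneg (l : List Char) (h : Bin l) : 0 ≤ val2 l :=
  (val2_lt l h.2).1

theorem bitLength_val2 (l : List Char) (h : Bin l) :
    PySem.Int.bitLength (val2 l) = l.length := by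
  have hlt := (val2_lt l h.2).2
  have hge := val2_ge l h
  have hne : l ≠ [] := by rintro rfl; simp [Bin] at h
  have hL : 1 ≤ l.length := List.length_pos_iff.mpr hne
  have hv0 : val2 l ≠ 0 := by
    have hp : (0 : Int) < 2 ^ (l.length - 1) := by positivity
    intro hz; rw [hz] at hge; linarith
  have h0 : 0 ≤ val2 l := (val2_lt l h.2).1
  have habs : (val2 l).natAbs = (val2 l).toNat := by omega
  have h1 : (val2 l).natAbs < 2 ^ PySem.Int.bitLength (val2 l) :=
    PySem.Int.lt_two_pow_bitLength _
  have h2 : 2 ^ (PySem.Int.bitLength (val2 l) - 1) ≤ (val2 l).natAbs :=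
    PySem.Int.two_pow_bitLength_le _ hv0
  -- bounds pin the bit length: 2^(B-1) ≤ v < 2^B and 2^(L-1) ≤ v < 2^L force B = L
  have hvlt : ((val2 l).natAbs : Int) < 2 ^ l.length := by
    rw [habs]; omega
  have hvge : (2 : Int) ^ (l.length - 1) ≤ ((val2 l).natAbs : Int) := by
    rw [habs]; omega
  set B := PySem.Int.bitLength (val2 l) with hB
  have hB1 : 1 ≤ B := by
    by_contra hc
    have : B = 0 := by omega
    rw [this] at h1; simp at h1; omega
  by_contra hne'
  rcases Nat.lt_or_ge B l.length with hlt' | hge'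
  · -- v < 2^B ≤ 2^(L-1) ≤ v, contradiction
    have : (2 : ℕ) ^ B ≤ 2 ^ (l.length - 1) := Nat.pow_le_pow_right (by norm_num) (by omega)
    have hn : (val2 l).natAbs < 2 ^ (l.length - 1) := lt_of_lt_of_le h1 this
    have : ((val2 l).natAbs : Int) < 2 ^ (l.length - 1) := by exact_mod_cast hn
    omega
  · have hgt : l.length < B := by omega
    have : (2 : ℕ) ^ l.length ≤ 2 ^ (B - 1) := Nat.pow_le_pow_right (by norm_num) (by omega)
    have hn : 2 ^ l.length ≤ (val2 l).natAbs := le_trans this h2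
    have : (2 : Int) ^ l.length ≤ ((val2 l).natAbs : Int) := by exact_mod_cast hn
    omega

-- the key step: A's  b << a.bit_length() | a  equals concatenation of the digit strings
theorem step_eq (sa sb : List Char) (ha : Bin sa) (hb : Bin sb) :
    PySem.Int.bor (val2 sb <<< PySem.Int.bitLength (val2 sa)) (val2 sa)
      = val2 (sb ++ sa) := by
  set k := PySem.Int.bitLength (val2 sa) with hk
  have hka : k = sa.length := bitLength_val2 sa ha
  have hbn : 0 ≤ val2 sb := val2_nonneg sb hb
  have han : 0 ≤ val2 sa := val2_nonneg sa ha
  have halt : val2 sa < 2 ^ sa.length := (val2_lt sa ha.2).2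
  have hsh : val2 sb <<< k = val2 sb * 2 ^ k := Int.shiftLeft_eq _ _
  have hshn : 0 ≤ val2 sb * 2 ^ k := by positivity
  rw [hsh, PySem.Int.bor_of_nonneg hshn han]
  have htn : (val2 sb * 2 ^ k).toNat = (val2 sb).toNat * 2 ^ k := by
    rcases Int.eq_ofNat_of_zero_le hbn with ⟨m, hm⟩
    have hc : ((m * 2 ^ k : Nat) : Int) = (m : Int) * 2 ^ k := by push_cast; ring
    rw [hm, ← hc, Int.toNat_natCast, Int.toNat_natCast]
  have hanlt : (val2 sa).toNat < 2 ^ k := by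
    zify
    rw [Int.toNat_of_nonneg han, hka]
    exact_mod_cast halt
  rw [htn, ← Nat.shiftLeft_eq, lor_shift k _ _ hanlt, val2_append]
  push_cast
  rw [Int.toNat_of_nonneg hbn, Int.toNat_of_nonneg han, hka]

-- A's loop tracks values of consecutive morphism iterates
theorem loop_eq (k m : Nat) :
    (loopA k (val2 (iterPhi m), val2 (iterPhi (m + 1)))).2 = val2 (iterPhi (m + k + 1)) := by
  induction k generalizing m with
  | zero => simp [loopA]
  | succ k ih =>
    simp only [loopA]
    have hstep := step_eq (iterPhi m) (iterPhi (m + 1)) (bin_iterPhi m) (bin_iterPhi (m + 1))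
    rw [hstep, ← iterPhi_succ_succ m]
    have := ih (m + 1)
    rw [show m + 1 + k + 1 = m + (k + 1) + 1 by ring] at this
    exact this

-- ===== VERDICT (by name: the statement is the Claim_ definition above) =====
theorem F_spec : Claim_equal_F := by
  intro n _
  unfold Spec_F F F_alt
  by_cases h : n ≤ 1
  · simp [h]
  · simp only [h, if_false]
    rw [loopB_eq_iterPhi]
    have hn : (n - 1).toNat = (n - 2).toNat + 1 := by omega
    rw [hn]
    have hL := loop_eq (n - 2).toNat 0
    have h1 : val2 (iterPhi 0) = 1 := rfl
    have h2 : val2 (iterPhi 1) = 2 := rfl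
    rw [h1, h2, Nat.zero_add] at hL
    exact hL
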